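-- pv_equiv track=rewrite | github.com/hbazille/project_euler | 173.py | hollow_laminae
-- ===== SOURCE A (Python) =====
-- def hollow_laminae(n):
--     r = 0
--     j = 1
--     for i in range(3, n // 4 + 2, 2):
--         while i * i - j * j > n:
--             j += 2
--         r += (i - j) // 2
--     j = 2
--     for i in range(4, n // 4 + 2, 2):
--         while i * i - j * j > n:
--             j += 2
--         r += (i - j) // 2
--     return r
-- ===== SOURCE B (Python) =====
-- def _isqrt(t):
--     # floor square root of t >= 1, by binary search
--     lo, hi = 0, t + 1
--     while hi - lo > 1:
--         mid = (lo + hi) // 2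
--         if mid * mid <= t:
--             lo = mid
--         else:
--             hi = mid
--     return lo
--
--
-- def _jmin(i, n, start):
--     # smallest j >= start with j == start (mod 2) and i*i - j*j <= n
--     t = i * i - n
--     if t <= 0:
--         return start
--     s = _isqrt(t)
--     if s * s < t:
--         s += 1
--     if (s - start) % 2:
--         s += 1
--     return s
--
--
-- def hollow_laminae(n):
--     r = 0
--     for i in range(3, n // 4 + 2, 2):
--         r += (i - _jmin(i, n, 1)) // 2
--     for i in range(4, n // 4 + 2, 2):
--         r += (i - _jmin(i, n, 2)) // 2
--     return r
-- ===== Notes on version B (the rewrite author's own statement) =====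
-- stated objective: alternative
-- what changed: The carried inner-side pointer and its while-loop are removed: for each outer side i the minimal inner side is computed directly in closed form via a ceiling square root (binary-search isqrt) with a parity adjustment.
import Mathlib
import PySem

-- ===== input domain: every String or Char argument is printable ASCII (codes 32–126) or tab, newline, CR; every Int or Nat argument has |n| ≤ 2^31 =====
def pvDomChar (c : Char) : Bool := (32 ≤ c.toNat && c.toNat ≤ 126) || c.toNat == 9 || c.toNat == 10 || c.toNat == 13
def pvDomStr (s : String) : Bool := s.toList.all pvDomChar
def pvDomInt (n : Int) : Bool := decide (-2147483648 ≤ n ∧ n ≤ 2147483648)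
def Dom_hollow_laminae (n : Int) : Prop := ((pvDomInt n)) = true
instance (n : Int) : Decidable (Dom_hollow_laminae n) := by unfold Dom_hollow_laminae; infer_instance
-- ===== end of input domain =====

-- B replaces A's carried inner-side pointer and its inner while-loop by a per-i closed-form
-- minimal inner side computed with a binary-search integer square root (alternative algorithm).

-- ===== PORT A =====
-- the inner 'while i*i - j*j > n: j += 2'; the 'j < i' test only makes the recursion total
-- (whenever the Python loop terminates, the test is implied by the loop condition)
def pyWhileA (n i j : Int) : Int :=
  if i * i - j * j > n ∧ j < i then pyWhileA n i (j + 2) else j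
termination_by (i - j).toNat
decreasing_by omega

def hollow_laminae (n : Int) : Int :=
  let b := PySem.Int.floordiv n 4 + 2
  let p1 := (PySem.List.pyRange 3 b 2).foldl
    (fun (st : Int × Int) i =>
      let j := pyWhileA n i st.2
      (st.1 + PySem.Int.floordiv (i - j) 2, j)) (0, 1)
  let p2 := (PySem.List.pyRange 4 b 2).foldl
    (fun (st : Int × Int) i =>
      let j := pyWhileA n i st.2
      (st.1 + PySem.Int.floordiv (i - j) 2, j)) (p1.1, 2)
  p2.1

-- ===== PORT B =====
-- midpoint bounds, cited by isqrtGo's decreasing_by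
theorem isqrt_mid_lt (lo hi : Int) (h : hi - lo > 1) :
    lo < PySem.Int.floordiv (lo + hi) 2 ∧ PySem.Int.floordiv (lo + hi) 2 < hi := by
  rw [PySem.Int.floordiv_eq_ediv_of_pos (by omega : (0:Int) < 2)]; omega

-- Source B _isqrt's binary-search while-loop
def isqrtGo (t lo hi : Int) : Int :=
  if h : hi - lo > 1 then
    let mid := PySem.Int.floordiv (lo + hi) 2
    if mid * mid ≤ t then isqrtGo t mid hi else isqrtGo t lo mid
  else lo
termination_by (hi - lo).toNat
decreasing_by
  · have := isqrt_mid_lt lo hi h; omega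
  · have := isqrt_mid_lt lo hi h; omega

-- Source B _jmin
def jminB (i n start : Int) : Int :=
  let t := i * i - n
  if t ≤ 0 then start
  else
    let s := isqrtGo t 0 (t + 1)
    let s := if s * s < t then s + 1 else s
    if PySem.Int.mod (s - start) 2 ≠ 0 then s + 1 else s

def hollow_laminae_alt (n : Int) : Int :=
  let b := PySem.Int.floordiv n 4 + 2
  let r1 := (PySem.List.pyRange 3 b 2).foldl
    (fun r i => r + PySem.Int.floordiv (i - jminB i n 1) 2) 0
  (PySem.List.pyRange 4 b 2).foldl
    (fun r i => r + PySem.Int.floordiv (i - jminB i n 2) 2) r1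

-- ===== PRECONDITION & SPEC =====
def Spec_hollow_laminae (n : Int) (out : Int) : Prop := out = hollow_laminae_alt n
instance (n : Int) (out : Int) : Decidable (Spec_hollow_laminae n out) := by unfold Spec_hollow_laminae; infer_instance

-- ===== CLAIM (what is proved, stated in full; the proofs are below) =====
def Claim_equal_hollow_laminae : Prop := ∀ (n : Int), Dom_hollow_laminae n → Spec_hollow_laminae n (hollow_laminae n)

-- ===== LEMMAS AND PROOFS =====

-- the binary search keeps lo*lo ≤ t < hi*hi and returns the integer square root
theorem isqrt_go_spec (t : Int) : ∀ (m : Nat) (lo hi : Int), (hi - lo).toNat ≤ m →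
    0 ≤ lo → lo < hi → lo * lo ≤ t → t < hi * hi →
    0 ≤ isqrtGo t lo hi ∧ isqrtGo t lo hi * isqrtGo t lo hi ≤ t ∧
      t < (isqrtGo t lo hi + 1) * (isqrtGo t lo hi + 1) := by
  intro m
  induction m with
  | zero => intro lo hi hm h0 hlt _ _; omega
  | succ m ih =>
    intro lo hi hm h0 hlt hlo hhi
    rw [isqrtGo]
    by_cases hgap : hi - lo > 1
    · rw [dif_pos hgap]
      have hb := isqrt_mid_lt lo hi hgap
      set mid := PySem.Int.floordiv (lo + hi) 2 with hmid
      by_cases hc : mid * mid ≤ t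
      · simp only [if_pos hc]
        exact ih mid hi (by omega) (by omega) (by omega) hc hhi
      · simp only [if_neg hc]
        exact ih lo mid (by omega) h0 (by omega) hlo (by omega)
    · rw [dif_neg hgap]
      have : hi = lo + 1 := by omega
      refine ⟨h0, hlo, by rw [← this]; exact hhi⟩

-- jminB i n start is the least j ≥ start of start's parity with i*i - j*j ≤ n
theorem jmin_spec (i n start : Int) (hs : start = 1 ∨ start = 2) :
    start ≤ jminB i n start ∧ 2 ∣ (jminB i n start - start) ∧
      i * i - jminB i n start * jminB i n start ≤ n ∧
      (∀ j, start ≤ j → 2 ∣ (j - start) → j < jminB i n start → i * i - j * j > n) := by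
  unfold jminB
  by_cases ht : i * i - n ≤ 0
  · simp only [if_pos ht]
    refine ⟨le_refl _, ⟨0, by ring⟩, by nlinarith [sq_nonneg start], fun j h1 _ h2 => by omega⟩
  · simp only [if_neg ht]
    have ht1 : 1 ≤ i * i - n := by omega
    obtain ⟨hs0, hs2, hs3⟩ := isqrt_go_spec (i * i - n) (i * i - n + 1 - 0).toNat 0 (i * i - n + 1)
      le_rfl le_rfl (by omega) (by omega) (by nlinarith)
    set s := isqrtGo (i * i - n) 0 (i * i - n + 1) with hsdef
    set c := if s * s < i * i - n then s + 1 else s with hc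
    -- c is the minimal nonneg integer with c*c ≥ i*i - n
    have hc0 : 0 ≤ c := by rw [hc]; split <;> omega
    have hcc : i * i - n ≤ c * c := by
      rw [hc]; split
      · nlinarith
      · omega
    have hs1 : 1 ≤ s ∨ (s = 0 ∧ s * s < i * i - n) := by
      rcases eq_or_lt_of_le hs0 with h | h
      · right
        have hz : s = 0 := h.symm
        rw [hz]; norm_num; omega
      · left; omega
    have hc1 : 1 ≤ c := by
      rw [hc]; split
      · omega
      · rename_i h; rcases hs1 with h1 | ⟨h1, h2⟩
        · omega
        · exact absurd h2 h
    have hcm : (c - 1) * (c - 1) < i * i - n := by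
      rw [hc]; split
      · simpa using ‹s * s < i * i - n›
      · have hs1' : 1 ≤ s := by rcases hs1 with h | ⟨h1, h2⟩ <;> omega
        have : s * s ≤ i * i - n := hs2
        nlinarith
    set M := if PySem.Int.mod (c - start) 2 ≠ 0 then c + 1 else c with hM
    have hmod : PySem.Int.mod (c - start) 2 = (c - start) % 2 :=
      PySem.Int.mod_eq_emod_of_pos (by omega)
    have hMc : (M = c ∨ M = c + 1) ∧ 2 ∣ (M - start) := by
      rw [hM, hmod]; split <;> rename_i h <;> constructor
      · right; rfl
      · omega
      · left; rfl
      · omega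
    obtain ⟨hMcases, hMpar⟩ := hMc
    have hM1 : start ≤ M := by
      rcases hs with h | h <;> rcases hMcases with h2 | h2 <;> omega
    refine ⟨hM1, hMpar, ?_, ?_⟩
    · have : c * c ≤ M * M := by rcases hMcases with h | h <;> nlinarith
      omega
    · intro j hj1 hj2 hj3
      have hjc : j ≤ c - 1 := by
        rcases hMcases with h | h
        · omega
        · omega
      have hj0 : 0 ≤ j := by rcases hs with h | h <;> omega
      have : j * j ≤ (c - 1) * (c - 1) := by nlinarith
      omega

theorem jmin_mono (i i' n start : Int) (hs : start = 1 ∨ start = 2) (h0 : 0 ≤ i) (hii : i ≤ i') :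
    jminB i n start ≤ jminB i' n start := by
  obtain ⟨h1, h2, h3, h4⟩ := jmin_spec i n start hs
  obtain ⟨g1, g2, g3, g4⟩ := jmin_spec i' n start hs
  by_contra hlt
  rw [not_le] at hlt
  have := h4 (jminB i' n start) g1 g2 hlt
  nlinarith

-- A's carried while-loop, started anywhere at or below the minimum, lands on jminB
theorem while_eq (n i start : Int) (hn : 0 ≤ n) (hi : 3 ≤ i) (hs : start = 1 ∨ start = 2) :
    ∀ (m : Nat) (j0 : Int), (jminB i n start - j0).toNat ≤ m → start ≤ j0 → 2 ∣ (j0 - start) →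
      j0 ≤ jminB i n start → pyWhileA n i j0 = jminB i n start := by
  obtain ⟨h1, h2, h3, h4⟩ := jmin_spec i n start hs
  intro m
  induction m with
  | zero =>
    intro j0 hm hj1 hj2 hj3
    have : j0 = jminB i n start := by omega
    subst this
    rw [pyWhileA, if_neg (by omega)]
  | succ m ih =>
    intro j0 hm hj1 hj2 hj3
    rcases eq_or_lt_of_le hj3 with heq | hlt
    · subst heq
      rw [pyWhileA, if_neg (by omega)]
    · have hcond : i * i - j0 * j0 > n := h4 j0 hj1 hj2 hlt
      have hj00 : 1 ≤ j0 := by rcases hs with h | h <;> omega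
      have hguard : j0 < i := by nlinarith
      rw [pyWhileA, if_pos ⟨hcond, hguard⟩]
      exact ih (j0 + 2) (by omega) (by omega) (by omega) (by omega)

-- one whole loop of A equals the corresponding loop of B
theorem loop_eq (n start : Int) (hn : 0 ≤ n) (hs : start = 1 ∨ start = 2) :
    ∀ (l : List Int), l.Pairwise (· ≤ ·) → (∀ i ∈ l, 3 ≤ i) →
    ∀ j0 r0, start ≤ j0 → 2 ∣ (j0 - start) → (∀ i ∈ l, j0 ≤ jminB i n start) →
      (l.foldl (fun (st : Int × Int) i =>
          let j := pyWhileA n i st.2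
          (st.1 + PySem.Int.floordiv (i - j) 2, j)) (r0, j0)).1 =
        l.foldl (fun r i => r + PySem.Int.floordiv (i - jminB i n start) 2) r0 := by
  intro l
  induction l with
  | nil => intros; rfl
  | cons i l ih =>
    intro hpw hmem j0 r0 hj1 hj2 hjle
    rw [List.pairwise_cons] at hpw
    have hi3 : 3 ≤ i := hmem i (by simp)
    have hw : pyWhileA n i j0 = jminB i n start :=
      while_eq n i start hn hi3 hs (jminB i n start - j0).toNat j0 le_rfl hj1 hj2
        (hjle i (by simp))
    obtain ⟨g1, g2, g3, g4⟩ := jmin_spec i n start hs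
    simp only [List.foldl_cons, hw]
    exact ih hpw.2 (fun x hx => hmem x (by simp [hx])) (jminB i n start) _ g1 g2
      (fun x hx => jmin_mono i x n start hs (by omega) (hpw.1 x hx))

theorem pyRange_two_nil (a b : Int) (h : b ≤ a) : PySem.List.pyRange a b 2 = [] := by
  rw [PySem.List.pyRange_of_pos a b (by omega), if_neg (by omega)]
  simp

theorem pairwise_le_pyRange_two (a b : Int) : (PySem.List.pyRange a b 2).Pairwise (· ≤ ·) := by
  rw [PySem.List.pyRange_of_pos a b (by omega)]
  rw [List.pairwise_map]
  exact List.pairwise_lt_range.imp (by intro x y h; omega)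

theorem main_eq (n : Int) : hollow_laminae n = hollow_laminae_alt n := by
  simp only [hollow_laminae, hollow_laminae_alt]
  have hb : PySem.Int.floordiv n 4 = n / 4 := PySem.Int.floordiv_eq_ediv_of_pos (by omega)
  by_cases hn : n ≤ 7
  · rw [hb, pyRange_two_nil 3 (n / 4 + 2) (by omega), pyRange_two_nil 4 (n / 4 + 2) (by omega)]
    rfl
  · have hn0 : (0:Int) ≤ n := by omega
    have h1 := loop_eq n 1 hn0 (Or.inl rfl) (PySem.List.pyRange 3 (PySem.Int.floordiv n 4 + 2) 2)
      (pairwise_le_pyRange_two _ _)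
      (fun i hi => ((PySem.List.mem_pyRange_iff_of_pos (by omega) i).1 hi).1)
      1 0 le_rfl (by omega)
      (fun i hi => (jmin_spec i n 1 (Or.inl rfl)).1)
    have h2 := fun r0 => loop_eq n 2 hn0 (Or.inr rfl) (PySem.List.pyRange 4 (PySem.Int.floordiv n 4 + 2) 2)
      (pairwise_le_pyRange_two _ _)
      (fun i hi => by have := ((PySem.List.mem_pyRange_iff_of_pos (by omega) i).1 hi).1; omega)
      2 r0 le_rfl (by omega)
      (fun i hi => (jmin_spec i n 2 (Or.inr rfl)).1)
    rw [h2, h1]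

-- ===== VERDICT (by name: the statement is the Claim_ definition above) =====
theorem hollow_laminae_spec : Claim_equal_hollow_laminae := by
  intro n _
  exact main_eq n
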